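-- pv_equiv track=rewrite | github.com/gimdongwon/Catch_python_tmi | Dongwon/programers/monthly_code1/starsequence.py | solution
-- ===== SOURCE A (Python) =====
-- from collections import Counter
--
-- def solution(a):
--     if len(a) == 1:
--         return 0
--     answer = -1
--     counter = Counter(a)
--
--     for k in counter.keys():
--         if counter[k] <= answer:
--             continue
--         idx = 0
--         result = 0
--         while idx < len(a)-1:
--             if (a[idx] != k and a[idx+1] != k) or a[idx] == a[idx+1]:
--                 idx += 1
--                 continue
--             result += 1
--             idx += 2
--         answer = max(result, answer)
--
--     if answer == -1:
--         return 0
--     else: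
--         return answer * 2
-- ===== SOURCE B (Python) =====
-- def solution(a):
--     # One pass over adjacent pairs; per-value greedy state kept in dicts.
--     cnt = {}
--     nxt = {}
--     for i in range(len(a) - 1):
--         x, y = a[i], a[i + 1]
--         if x == y:
--             continue
--         for k in (x, y):
--             if nxt.get(k, 0) <= i:
--                 cnt[k] = cnt.get(k, 0) + 1
--                 nxt[k] = i + 2
--     return 2 * max(cnt.values(), default=0)
-- ===== Notes on version B (the rewrite author's own statement) =====
-- stated objective: alternative
-- what changed: Instead of re-scanning the whole list once per distinct value (with Counter-based pruning), B makes a single pass over adjacent pairs, updating every value's greedy pair-count and next-free-index in two dicts, then doubles the maximum count.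
import Mathlib
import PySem

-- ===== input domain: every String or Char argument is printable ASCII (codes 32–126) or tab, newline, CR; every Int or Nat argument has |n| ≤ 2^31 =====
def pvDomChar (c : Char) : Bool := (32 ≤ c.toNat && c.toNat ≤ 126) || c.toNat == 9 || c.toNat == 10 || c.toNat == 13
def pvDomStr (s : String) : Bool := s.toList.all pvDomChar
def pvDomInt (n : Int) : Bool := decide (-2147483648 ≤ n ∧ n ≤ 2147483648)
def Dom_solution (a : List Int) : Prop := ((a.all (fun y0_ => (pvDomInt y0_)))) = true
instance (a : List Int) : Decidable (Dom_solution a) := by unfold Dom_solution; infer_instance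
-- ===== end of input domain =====

-- B replaces A's per-distinct-value rescan of the whole list by ONE pass over adjacent pairs
-- that updates every value's greedy state in two dicts (alternative algorithm, fewer scans).

-- ===== PORT A =====
-- A's inner while loop over (idx, result); idx and idx+1 are provably in range (0 ≤ idx < idx+1 ≤ len-1)
-- whenever Python evaluates a[idx] / a[idx+1], so those accesses are ported exactly as List.getD.
def aLoop (a : List Int) (k : Int) (idx : Nat) (result : Int) : Int :=
  if idx < a.length - 1 then
    if (a.getD idx 0 ≠ k ∧ a.getD (idx+1) 0 ≠ k) ∨ a.getD idx 0 = a.getD (idx+1) 0 then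
      aLoop a k (idx+1) result
    else
      aLoop a k (idx+2) (result + 1)
  else result
termination_by a.length - idx
decreasing_by all_goals omega

def solution (a : List Int) : Int :=
  if a.length = 1 then 0
  else
    let counter := PySem.Dict.counter a
    let answer := counter.keys.foldl
      (fun answer k =>
        if counter.getD k 0 ≤ answer then answer
        else max (aLoop a k 0 0) answer) (-1)
    if answer = -1 then 0 else answer * 2

-- ===== PORT B =====
-- one iteration of B's loop body at index i (i+1 ≤ len-1, so a[i], a[i+1] are exact as List.getD)
def bStep (a : List Int) (st : PySem.Dict Int Int × PySem.Dict Int Int) (i : Nat) :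
    PySem.Dict Int Int × PySem.Dict Int Int :=
  let x := a.getD i 0
  let y := a.getD (i+1) 0
  if x = y then st
  else
    [x, y].foldl
      (fun st k =>
        if st.2.getD k 0 ≤ (i : Int) then
          (st.1.insert k (st.1.getD k 0 + 1), st.2.insert k ((i : Int) + 2))
        else st) st

def solution_alt (a : List Int) : Int :=
  -- "for i in range(len(a) - 1)" ported as a fold over List.range (a.length - 1)
  let st := (List.range (a.length - 1)).foldl (bStep a) (PySem.Dict.empty, PySem.Dict.empty)
  -- max(cnt.values(), default=0)
  2 * PySem.List.maxD st.1.values (fun v => v) 0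

-- ===== PRECONDITION & SPEC =====
def Spec_solution (a : List Int) (out : Int) : Prop := out = solution_alt a
instance (a : List Int) (out : Int) : Decidable (Spec_solution a out) := by unfold Spec_solution; infer_instance

-- ===== CLAIM (what is proved, stated in full; the proofs are below) =====
def Claim_equal_solution : Prop := ∀ (a : List Int), Dom_solution a → Spec_solution a (solution a)

-- ===== LEMMAS AND PROOFS =====

-- proof-side form of A's greedy count (no accumulator)
def g (a : List Int) (k : Int) (idx : Nat) : Int :=
  if idx < a.length - 1 then
    if (a.getD idx 0 ≠ k ∧ a.getD (idx+1) 0 ≠ k) ∨ a.getD idx 0 = a.getD (idx+1) 0 then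
      g a k (idx+1)
    else 1 + g a k (idx+2)
  else 0
termination_by a.length - idx
decreasing_by all_goals omega

lemma g_skip (a : List Int) (k : Int) (i : Nat) (hi : i < a.length - 1)
    (hc : (a.getD i 0 ≠ k ∧ a.getD (i+1) 0 ≠ k) ∨ a.getD i 0 = a.getD (i+1) 0) :
    g a k i = g a k (i+1) := by rw [g, if_pos hi, if_pos hc]

lemma g_take (a : List Int) (k : Int) (i : Nat) (hi : i < a.length - 1)
    (hc : ¬ ((a.getD i 0 ≠ k ∧ a.getD (i+1) 0 ≠ k) ∨ a.getD i 0 = a.getD (i+1) 0)) :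
    g a k i = 1 + g a k (i+2) := by rw [g, if_pos hi, if_neg hc]

lemma aLoop_eq_g (a : List Int) (k : Int) (idx : Nat) (r : Int) :
    aLoop a k idx r = r + g a k idx := by
  fun_induction aLoop with
  | case1 idx r h hc ih => rw [g]; simp only [h, if_true, hc, if_true]; omega
  | case2 idx r h hc ih => rw [g]; simp only [h, if_true, hc, if_false]; omega
  | case3 idx r h => rw [g]; simp [h]

lemma g_nonneg (a : List Int) (k : Int) (idx : Nat) : 0 ≤ g a k idx := by
  fun_induction g with
  | case1 idx h hc ih => exact ih
  | case2 idx h hc ih => omega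
  | case3 idx h => exact le_refl 0

lemma g_stop (a : List Int) (k : Int) {idx : Nat} (h : a.length - 1 ≤ idx) : g a k idx = 0 := by
  rw [g]; simp [Nat.not_lt.mpr h]

lemma g_le_count (a : List Int) (k : Int) (idx : Nat) :
    g a k idx ≤ ((a.drop idx).count k : Int) := by
  fun_induction g with
  | case1 idx h hc ih =>
      have h1 : idx < a.length := by omega
      have e1 : a.drop idx = a[idx] :: a.drop (idx+1) := List.drop_eq_getElem_cons h1
      rw [e1, List.count_cons]
      refine le_trans ih ?_
      push_cast; omega
  | case2 idx h hc ih =>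
      have h1 : idx < a.length := by omega
      have h2 : idx + 1 < a.length := by omega
      have e1 : a.drop idx = a[idx] :: a.drop (idx+1) := List.drop_eq_getElem_cons h1
      have e2 : a.drop (idx+1) = a[idx+1] :: a.drop (idx+2) := List.drop_eq_getElem_cons h2
      have hk : a[idx] = k ∨ a[idx+1] = k := by
        rw [List.getD_eq_getElem a 0 h1, List.getD_eq_getElem a 0 h2] at hc
        tauto
      rw [e1, e2, List.count_cons, List.count_cons]
      rcases hk with hk | hk <;> simp [hk] <;> omega
  | case3 idx h => positivity

-- the invariant of B's single pass: after the first i loop iterations, for every value k the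
-- pair count so far plus the greedy count restarted at max(nxt[k], i) is the full greedy count
def BInv (a : List Int) (i : Nat) (st : PySem.Dict Int Int × PySem.Dict Int Int) : Prop :=
  st.1.keys.Nodup ∧ (∀ k ∈ st.1.keys, k ∈ a) ∧
  ∀ k : Int, ∃ m : Nat, st.2.getD k 0 = (m : Int) ∧ m ≤ i + 1 ∧
    g a k 0 = st.1.getD k 0 + g a k (max m i)

def bIns (i : Int) (st : PySem.Dict Int Int × PySem.Dict Int Int) (k : Int) :
    PySem.Dict Int Int × PySem.Dict Int Int :=
  if st.2.getD k 0 ≤ i then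
    (st.1.insert k (st.1.getD k 0 + 1), st.2.insert k (i + 2))
  else st

lemma bIns_getD_of_ne (i : Int) (st : PySem.Dict Int Int × PySem.Dict Int Int) (k j : Int)
    (hj : j ≠ k) : (bIns i st k).1.getD j 0 = st.1.getD j 0 ∧
      (bIns i st k).2.getD j 0 = st.2.getD j 0 := by
  unfold bIns; split_ifs <;> simp [PySem.Dict.getD_insert, hj]

lemma bIns_nodup (i : Int) (st : PySem.Dict Int Int × PySem.Dict Int Int) (k : Int)
    (h : st.1.keys.Nodup) : (bIns i st k).1.keys.Nodup := by
  unfold bIns; split_ifs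
  · exact PySem.Dict.nodup_keys_insert _ _ _ h
  · exact h

lemma bIns_mem_keys (i : Int) (st : PySem.Dict Int Int × PySem.Dict Int Int) (k j : Int)
    (hj : j ∈ (bIns i st k).1.keys) : j = k ∨ j ∈ st.1.keys := by
  unfold bIns at hj; split_ifs at hj
  · exact (PySem.Dict.mem_keys_insert _ _ _ _).mp hj
  · exact Or.inr hj

lemma inv_shift (a : List Int) (k : Int) (i m : Nat) (c : Int)
    (h2 : m ≤ i + 1) (h3 : g a k 0 = c + g a k (max m i))
    (hgs : g a k i = g a k (i+1)) : g a k 0 = c + g a k (max m (i+1)) := by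
  rcases Nat.lt_or_ge m (i+1) with hm | hm
  · rw [show max m (i+1) = i+1 by omega, ← hgs, show max m i = i from by omega] at *
    exact h3
  · rw [show max m (i+1) = i+1 by omega, show max m i = i+1 from by omega] at *
    exact h3

lemma bIns_touch (a : List Int) (k : Int) (i : Nat)
    (st : PySem.Dict Int Int × PySem.Dict Int Int) (hi : i < a.length - 1)
    (hrel : ¬ ((a.getD i 0 ≠ k ∧ a.getD (i+1) 0 ≠ k) ∨ a.getD i 0 = a.getD (i+1) 0))
    (m : Nat) (h1 : st.2.getD k 0 = (m : Int)) (h2 : m ≤ i + 1)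
    (h3 : g a k 0 = st.1.getD k 0 + g a k (max m i)) :
    ∃ m' : Nat, (bIns (i : Int) st k).2.getD k 0 = (m' : Int) ∧ m' ≤ i + 2 ∧
      g a k 0 = (bIns (i : Int) st k).1.getD k 0 + g a k (max m' (i+1)) := by
  unfold bIns
  by_cases hb : st.2.getD k 0 ≤ (i : Int)
  · have hm : m ≤ i := by rw [h1] at hb; exact_mod_cast hb
    rw [if_pos hb]
    refine ⟨i+2, ?_, by omega, ?_⟩
    · simp [PySem.Dict.getD_insert_self]
    · simp only [PySem.Dict.getD_insert_self]
      rw [show max (i+2) (i+1) = i+2 by omega, h3, show max m i = i by omega,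
        g_take a k i hi hrel]
      ring
  · have hm : m = i+1 := by
      rw [h1] at hb; have : ¬ m ≤ i := by exact_mod_cast hb
      omega
    rw [if_neg hb]
    refine ⟨m, h1, by omega, ?_⟩
    rw [h3, hm, show max (i+1) i = i+1 by omega, show max (i+1) (i+1) = i+1 by omega]

lemma bPair_inv (a : List Int) (i : Nat) (x y : Int)
    (st : PySem.Dict Int Int × PySem.Dict Int Int)
    (hi : i < a.length - 1) (hx : a.getD i 0 = x) (hy : a.getD (i+1) 0 = y) (hxy : x ≠ y)
    (hnd : st.1.keys.Nodup) (hmem : ∀ k ∈ st.1.keys, k ∈ a)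
    (hinv : ∀ k : Int, ∃ m : Nat, st.2.getD k 0 = (m : Int) ∧ m ≤ i + 1 ∧
      g a k 0 = st.1.getD k 0 + g a k (max m i)) :
    BInv a (i+1) (bIns (i : Int) (bIns (i : Int) st x) y) := by
  have hxa : x ∈ a := by
    rw [← hx, List.getD_eq_getElem a 0 (by omega)]; exact List.getElem_mem _
  have hya : y ∈ a := by
    rw [← hy, List.getD_eq_getElem a 0 (by omega)]; exact List.getElem_mem _
  refine ⟨bIns_nodup _ _ _ (bIns_nodup _ _ _ hnd), ?_, fun k => ?_⟩
  · intro j hj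
    rcases bIns_mem_keys _ _ _ _ hj with rfl | hj'
    · exact hya
    · rcases bIns_mem_keys _ _ _ _ hj' with rfl | hj'' <;> [exact hxa; exact hmem _ hj'']
  · obtain ⟨m, h1, h2, h3⟩ := hinv k
    by_cases hkx : k = x
    · subst hkx
      obtain ⟨e1, e2⟩ := bIns_getD_of_ne (i : Int) (bIns (i : Int) st k) y k hxy
      have hrel : ¬ ((a.getD i 0 ≠ k ∧ a.getD (i+1) 0 ≠ k) ∨ a.getD i 0 = a.getD (i+1) 0) := by
        rw [hx, hy]; rintro (⟨hA, hB⟩ | hE); exacts [hA rfl, hxy hE]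
      obtain ⟨m', e1', e2', e3'⟩ := bIns_touch a k i st hi hrel m h1 h2 h3
      exact ⟨m', by rw [e2]; exact e1', by omega, by rw [e1]; exact e3'⟩
    · by_cases hky : k = y
      · subst hky
        obtain ⟨e1, e2⟩ := bIns_getD_of_ne (i : Int) st x k hkx
        have hrel : ¬ ((a.getD i 0 ≠ k ∧ a.getD (i+1) 0 ≠ k) ∨ a.getD i 0 = a.getD (i+1) 0) := by
          rw [hx, hy]; rintro (⟨hA, hB⟩ | hE); exacts [hB rfl, hxy hE]
        obtain ⟨m', e1', e2', e3'⟩ := bIns_touch a k i (bIns (i : Int) st x) hi hrel m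
          (by rw [e2]; exact h1) h2 (by rw [e1]; exact h3)
        exact ⟨m', e1', by omega, e3'⟩
      · obtain ⟨e1, e2⟩ := bIns_getD_of_ne (i : Int) st x k hkx
        obtain ⟨e1', e2'⟩ := bIns_getD_of_ne (i : Int) (bIns (i : Int) st x) y k hky
        have hc : (a.getD i 0 ≠ k ∧ a.getD (i+1) 0 ≠ k) ∨ a.getD i 0 = a.getD (i+1) 0 := by
          rw [hx, hy]; exact Or.inl ⟨fun hh => hkx hh.symm, fun hh => hky hh.symm⟩
        refine ⟨m, by rw [e2', e2]; exact h1, by omega, ?_⟩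
        rw [e1', e1]
        exact inv_shift a k i m _ h2 h3 (g_skip a k i hi hc)

lemma bStep_inv (a : List Int) (i : Nat) (st : PySem.Dict Int Int × PySem.Dict Int Int)
    (hi : i < a.length - 1) (h : BInv a i st) : BInv a (i+1) (bStep a st i) := by
  obtain ⟨hnd, hmem, hinv⟩ := h
  unfold bStep
  by_cases hxy : a.getD i 0 = a.getD (i+1) 0
  · rw [if_pos hxy]
    refine ⟨hnd, hmem, fun k => ?_⟩
    obtain ⟨m, h1, h2, h3⟩ := hinv k
    exact ⟨m, h1, by omega, inv_shift a k i m _ h2 h3 (g_skip a k i hi (Or.inr hxy))⟩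
  · rw [if_neg hxy]
    have hfold : ([a.getD i 0, a.getD (i+1) 0].foldl
        (fun st k =>
          if st.2.getD k 0 ≤ (i : Int) then
            (st.1.insert k (st.1.getD k 0 + 1), st.2.insert k ((i : Int) + 2))
          else st) st) = bIns (i : Int) (bIns (i : Int) st (a.getD i 0)) (a.getD (i+1) 0) := rfl
    rw [hfold]
    exact bPair_inv a i _ _ st hi rfl rfl hxy hnd hmem hinv
lemma bState_inv (a : List Int) (i : Nat) (hi : i ≤ a.length - 1) :
    BInv a i ((List.range i).foldl (bStep a) (PySem.Dict.empty, PySem.Dict.empty)) := by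
  induction i with
  | zero =>
      refine ⟨by simp [PySem.Dict.keys_empty], by simp [PySem.Dict.keys_empty], fun k => ⟨0, ?_⟩⟩
      simp [PySem.Dict.getD_empty]
  | succ i ih =>
      rw [List.range_succ, List.foldl_append]
      exact bStep_inv a i _ (by omega) (ih (by omega))

lemma fold_prune (a : List Int) (l : List Int) (init : Int) :
    l.foldl (fun ans k => if (List.count k a : Int) ≤ ans then ans
      else max (g a k 0) ans) init
    = l.foldl (fun ans k => max ans (g a k 0)) init := by
  induction l generalizing init with
  | nil => rfl
  | cons k t ih =>
      simp only [List.foldl_cons]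
      by_cases hc : (List.count k a : Int) ≤ init
      · have hg : g a k 0 ≤ init :=
          le_trans (by simpa using g_le_count a k 0) hc
        rw [if_pos hc, max_eq_left hg]
        exact ih init
      · rw [if_neg hc, max_comm (g a k 0) init]
        exact ih _

lemma foldl_max_attained (f : Int → Int) (l : List Int) (init : Int) :
    l.foldl (fun acc y => max acc (f y)) init = init ∨
      ∃ k ∈ l, l.foldl (fun acc y => max acc (f y)) init = f k := by
  have he : l.foldl (fun acc y => max acc (f y)) init = (l.map f).foldl max init :=
    (List.foldl_map).symm
  rw [he]
  rcases PySem.List.foldl_max_mem (l.map f) init with h | h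
  · exact Or.inl h
  · obtain ⟨k, hk, hke⟩ := List.mem_map.mp h
    exact Or.inr ⟨k, hk, hke.symm⟩

lemma solution_eq_alt (a : List Int) : solution a = solution_alt a := by
  by_cases h0 : a = []
  · subst h0; decide
  by_cases h1 : a.length = 1
  · rw [solution, solution_alt, if_pos h1, h1]
    rfl
  have hlen : 2 ≤ a.length := by
    have : a.length ≠ 0 := fun h => h0 (List.eq_nil_of_length_eq_zero h)
    omega
  obtain ⟨hnd, hsub, hinv⟩ := bState_inv a (a.length - 1) (le_refl _)
  set ST := (List.range (a.length - 1)).foldl (bStep a) (PySem.Dict.empty, PySem.Dict.empty)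
    with hST
  have hval : ∀ k, ST.1.getD k 0 = g a k 0 := by
    intro k
    obtain ⟨m, _, _, h3⟩ := hinv k
    rw [h3, g_stop a k (le_max_right m (a.length - 1))]
    ring
  have hvals : ST.1.values = ST.1.keys.map (fun k => ST.1.getD k 0) :=
    PySem.Dict.values_eq_map_keys ST.1 hnd 0
  -- every value of cnt is some g a k 0 with k ∈ a
  have hval_mem : ∀ v ∈ ST.1.values, ∃ k ∈ a, v = g a k 0 := by
    intro v hvmem
    rw [hvals] at hvmem
    obtain ⟨k, hk, hke⟩ := List.mem_map.mp hvmem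
    exact ⟨k, hsub k hk, by rw [← hke, hval]⟩
  -- A's answer
  rw [solution, solution_alt, if_neg h1]
  simp only [PySem.Dict.keys_counter, PySem.Dict.getD_counter, aLoop_eq_g, zero_add]
  rw [fold_prune]
  set M := (PySem.Set.ofList a).foldl (fun ans k => max ans (g a k 0)) (-1) with hM
  have hbounds := PySem.List.le_foldl_max_int (PySem.Set.ofList a) (fun k => g a k 0) (-1)
  have hMge : ∀ k ∈ a, g a k 0 ≤ M := by
    intro k hk
    exact hbounds.2 k ((PySem.Set.mem_ofList _ _).mpr hk)
  have hM0 : 0 ≤ M := by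
    have ha0 : a.getD 0 0 ∈ a := by
      rw [List.getD_eq_getElem a 0 (by omega)]; exact List.getElem_mem _
    exact le_trans (g_nonneg a (a.getD 0 0) 0) (hMge _ ha0)
  set V := PySem.List.maxD ST.1.values (fun v => v) 0 with hV
  have hV0 : 0 ≤ V := by
    rcases hvemp : ST.1.values with _ | ⟨v, t⟩
    · simp [hV, PySem.List.maxD, PySem.List.max?, hvemp]
    · have := PySem.List.max?_mem (xs := ST.1.values) (key := fun v => v) (m := V) ?_
      · obtain ⟨k, _, hke⟩ := hval_mem V this
        rw [hke]; exact g_nonneg a k 0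
      · rw [hV, PySem.List.maxD]
        rcases hmax : PySem.List.max? ST.1.values (fun v => v) with _ | v'
        · rw [PySem.List.max?_eq_none_iff] at hmax; rw [hvemp] at hmax; cases hmax
        · rfl
  have hVmax : ∀ v ∈ ST.1.values, v ≤ V := by
    intro v hvmem
    rcases hmax : PySem.List.max? ST.1.values (fun v => v) with _ | v'
    · rw [PySem.List.max?_eq_none_iff] at hmax; rw [hmax] at hvmem; cases hvmem
    · have := PySem.List.max?_isMax hmax v hvmem
      have hVv : V = v' := by rw [hV, PySem.List.maxD, hmax]; rfl
      rw [hVv]; exact this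
  have hMV : M = V := by
    apply le_antisymm
    · rcases foldl_max_attained (fun k => g a k 0) (PySem.Set.ofList a) (-1) with h | h
      · rw [← hM] at h; omega
      · obtain ⟨k, hk, hke⟩ := h
        rw [← hM] at hke
        rw [hke]
        by_cases hkk : k ∈ ST.1.keys
        · apply hVmax
          rw [hvals, ← hval k]
          exact List.mem_map.mpr ⟨k, hkk, rfl⟩
        · have hco : ST.1.contains k = false := by
            rcases hco' : ST.1.contains k with _ | _
            · rfl
            · exact absurd ((PySem.Dict.contains_iff_mem_keys ST.1 k).mp hco') hkk
          have : g a k 0 = 0 := by rw [← hval k, PySem.Dict.getD_of_not_contains _ _ hco]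
          rw [this]; exact hV0
    · rcases hvemp : ST.1.values with _ | ⟨v, t⟩
      · have : V = 0 := by simp [hV, PySem.List.maxD, PySem.List.max?, hvemp]
        rw [this]; exact hM0
      · have hVvals : V ∈ ST.1.values := by
          apply PySem.List.max?_mem (key := fun v => v)
          rw [hV, PySem.List.maxD]
          rcases hmax : PySem.List.max? ST.1.values (fun v => v) with _ | v'
          · rw [PySem.List.max?_eq_none_iff] at hmax; rw [hvemp] at hmax; cases hmax
          · rfl
        obtain ⟨k, hk, hke⟩ := hval_mem V hVvals
        rw [hke]
        exact hMge k hk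
  rw [hMV, if_neg (by omega)]
  ring

-- ===== VERDICT (by name: the statement is the Claim_ definition above) =====
theorem solution_spec : Claim_equal_solution := by
  intro a _
  exact solution_eq_alt a
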